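-- pv_equiv track=rewrite | github.com/KSP-CKAN/metadata-webtool | app.py | filter_simple
-- ===== SOURCE A (Python) =====
-- def filter_simple(entries, where_eq, latest):
--     if where_eq:
--         fe = [e for e in entries if all(
--             v == e.get(k, None) for k, v in where_eq)]
--     else:
--         fe = entries
--     if not latest:
--         return fe
--     lv = {}
--     for e in fe:
--         k = e["identifier"]
--         if k not in lv or lv[k]["x_sortable_version"] <= e["x_sortable_version"]:
--             lv[k] = e
--     return sorted(lv.values(), key=(lambda e: e["identifier"]))
-- ===== SOURCE B (Python) =====
-- def filter_simple(entries, where_eq, latest):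
--     if where_eq:
--         fe = [e for e in entries if all(
--             v == e.get(k, None) for k, v in where_eq)]
--     else:
--         fe = entries
--     if not latest:
--         return fe
--     out = []
--     for ident in sorted({e["identifier"] for e in fe}):
--         best = None
--         for e in fe:
--             if e["identifier"] == ident and (
--                     best is None or
--                     best["x_sortable_version"] <= e["x_sortable_version"]):
--                 best = e
--         out.append(best)
--     return out
-- ===== Notes on version B (the rewrite author's own statement) =====
-- stated objective: alternative
-- what changed: The latest-per-identifier phase no longer builds a dict and sorts its values: B collects the distinct identifiers, sorts them once, and for each identifier does a direct last-wins max scan over the filtered list, emitting winners already in sorted order.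
import Mathlib
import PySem

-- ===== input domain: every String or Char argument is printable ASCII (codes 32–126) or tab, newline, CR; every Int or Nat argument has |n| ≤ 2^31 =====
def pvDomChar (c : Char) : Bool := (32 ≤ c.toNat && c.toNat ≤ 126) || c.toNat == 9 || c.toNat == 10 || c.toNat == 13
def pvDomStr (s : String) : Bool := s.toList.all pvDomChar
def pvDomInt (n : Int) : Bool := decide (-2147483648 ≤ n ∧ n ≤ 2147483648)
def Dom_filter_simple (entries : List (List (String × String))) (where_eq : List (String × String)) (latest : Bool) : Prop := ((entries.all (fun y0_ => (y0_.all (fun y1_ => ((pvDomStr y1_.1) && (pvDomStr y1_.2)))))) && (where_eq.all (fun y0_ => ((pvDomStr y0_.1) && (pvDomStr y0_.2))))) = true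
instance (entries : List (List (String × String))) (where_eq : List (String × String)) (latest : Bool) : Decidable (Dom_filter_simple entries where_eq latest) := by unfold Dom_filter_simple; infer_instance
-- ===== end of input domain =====

-- B replaces A's dict-accumulation + final sort by: sort the distinct identifiers once,
-- then one last-wins max scan of the filtered list per identifier (objective: alternative).

-- shared helpers: a Python dict as an association list; e.get(k, None) = first match
def pvLookup (e : List (String × String)) (k : String) : Option String :=
  (e.find? (fun p => p.1 == k)).map (·.2)

-- e["identifier"] / e["x_sortable_version"]; the default "" is never reached under Pre_
def pvIdent (e : List (String × String)) : String := (pvLookup e "identifier").getD ""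
def pvVer (e : List (String × String)) : String := (pvLookup e "x_sortable_version").getD ""

-- the filtering pass, identical in source A and in Source B
def pvFilter (entries : List (List (String × String))) (where_eq : List (String × String)) :
    List (List (String × String)) :=
  if where_eq.isEmpty then entries
  else entries.filter (fun e => where_eq.all (fun kv => pvLookup e kv.1 == some kv.2))

-- ===== PORT A =====
-- one iteration of A's `for e in fe` loop over the dict lv
def pvStepA (d : PySem.Dict String (List (String × String))) (e : List (String × String)) :
    PySem.Dict String (List (String × String)) :=
  let k := pvIdent e
  if !d.contains k || decide (pvVer (d.getD k []) ≤ pvVer e) then d.insert k e else d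

def filter_simple (entries : List (List (String × String))) (where_eq : List (String × String)) (latest : Bool) : List (List (String × String)) :=
  let fe := pvFilter entries where_eq
  if !latest then fe
  else
    let lv := fe.foldl pvStepA PySem.Dict.empty
    PySem.List.sorted lv.values (fun e => pvIdent e) false

-- ===== PORT B =====
-- inner scan of Source B: last-wins maximum by x_sortable_version among entries with this identifier
def pvStepB (ident : String) (best : Option (List (String × String))) (e : List (String × String)) :
    Option (List (String × String)) :=
  if pvIdent e == ident && (best.isNone || decide (pvVer (best.getD []) ≤ pvVer e))
  then some e else best

def pvBest (fe : List (List (String × String))) (ident : String) :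
    Option (List (String × String)) :=
  fe.foldl (pvStepB ident) none

def filter_simple_alt (entries : List (List (String × String))) (where_eq : List (String × String)) (latest : Bool) : List (List (String × String)) :=
  let fe := pvFilter entries where_eq
  if !latest then fe
  else
    (PySem.List.sorted (PySem.Set.ofList (fe.map pvIdent)) (fun x => x) false).map
      (fun ident => (pvBest fe ident).getD [])

-- ===== PRECONDITION & SPEC =====
-- Pre_ excludes exactly the inputs where A raises KeyError: latest=True and some entry that
-- survives the where_eq filter lacks the "identifier" or "x_sortable_version" key.
def Pre_filter_simple (entries : List (List (String × String))) (where_eq : List (String × String)) (latest : Bool) : Prop :=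
  latest = true → ∀ e ∈ entries,
    (where_eq.isEmpty = true ∨ where_eq.all (fun kv => pvLookup e kv.1 == some kv.2) = true) →
    (pvLookup e "identifier").isSome = true ∧ (pvLookup e "x_sortable_version").isSome = true
instance (entries : List (List (String × String))) (where_eq : List (String × String)) (latest : Bool) : Decidable (Pre_filter_simple entries where_eq latest) := by unfold Pre_filter_simple; infer_instance

def pvWitness_filter_simple : (List (List (String × String))) × (List (String × String)) × Bool :=
  ([[("identifier", "a"), ("x_sortable_version", "1")],
    [("identifier", "a"), ("x_sortable_version", "2")],
    [("identifier", "b"), ("x_sortable_version", "1")]], [], true)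

def Spec_filter_simple (entries : List (List (String × String))) (where_eq : List (String × String)) (latest : Bool) (out : List (List (String × String))) : Prop := out = filter_simple_alt entries where_eq latest
instance (entries : List (List (String × String))) (where_eq : List (String × String)) (latest : Bool) (out : List (List (String × String))) : Decidable (Spec_filter_simple entries where_eq latest out) := by unfold Spec_filter_simple; infer_instance

-- ===== CLAIM (what is proved, stated in full; the proofs are below) =====
def Claim_equal_filter_simple : Prop := ∀ (entries : List (List (String × String))) (where_eq : List (String × String)) (latest : Bool), Dom_filter_simple entries where_eq latest → Pre_filter_simple entries where_eq latest → Spec_filter_simple entries where_eq latest (filter_simple entries where_eq latest)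

-- ===== LEMMAS AND PROOFS =====

-- one A-step seen through key k is one B-step on the accumulator d.get? k
theorem stepA_get? (d : PySem.Dict String (List (String × String)))
    (e : List (String × String)) (k : String) :
    (pvStepA d e).get? k = pvStepB k (d.get? k) e := by
  by_cases hk : pvIdent e = k
  · subst hk
    rcases hdk : d.get? (pvIdent e) with _ | w
    · simp [pvStepA, pvStepB, PySem.Dict.contains_eq_isSome_get?, hdk]
    · by_cases hle : pvVer w ≤ pvVer e
      · simp [pvStepA, pvStepB, PySem.Dict.contains_eq_isSome_get?,
          PySem.Dict.getD_eq_get?_getD, hdk, hle]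
      · simp [pvStepA, pvStepB, PySem.Dict.contains_eq_isSome_get?,
          PySem.Dict.getD_eq_get?_getD, hdk, hle]
  · have hb : (pvIdent e == k) = false := by simp [hk]
    have hB : pvStepB k (d.get? k) e = d.get? k := by simp [pvStepB, hb]
    rw [hB]
    simp only [pvStepA]
    split_ifs with h
    · rw [PySem.Dict.get?_insert, if_neg (fun h' => hk h'.symm)]
    · rfl

-- the dict's entry at key k evolves exactly as Source B's per-identifier accumulator
theorem get?_foldl_stepA (fe : List (List (String × String))) (k : String) :
    ∀ d : PySem.Dict String (List (String × String)),
      (fe.foldl pvStepA d).get? k = fe.foldl (pvStepB k) (d.get? k) := by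
  induction fe with
  | nil => intro d; rfl
  | cons e fe ih =>
    intro d
    simp only [List.foldl_cons, ih, stepA_get?]

-- one A-step adds the entry's identifier to the key list the way Python's set.add does
theorem stepA_keys (d : PySem.Dict String (List (String × String)))
    (e : List (String × String)) :
    (pvStepA d e).keys = PySem.Set.add d.keys (pvIdent e) := by
  by_cases hc : d.contains (pvIdent e) = true
  · have hm : pvIdent e ∈ d.keys := (PySem.Dict.contains_iff_mem_keys _ _).mp hc
    have hs : PySem.Set.add d.keys (pvIdent e) = d.keys := by
      simp [PySem.Set.add, PySem.Set.contains, hm]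
    rw [hs]
    simp only [pvStepA]
    split_ifs with h
    · exact PySem.Dict.keys_insert_of_contains _ _ hc
    · rfl
  · have hc' : d.contains (pvIdent e) = false := by simpa using hc
    have hm : pvIdent e ∉ d.keys := fun h =>
      by simp [(PySem.Dict.contains_iff_mem_keys _ _).mpr h] at hc'
    simp only [pvStepA, hc', Bool.not_false, Bool.true_or, if_true]
    rw [PySem.Dict.keys_insert_of_not_contains _ _ hc']
    simp [PySem.Set.add, PySem.Set.contains, hm]

-- keys of the dict loop = Python set of the identifiers seen so far (first-occurrence order)
theorem keys_foldl_stepA (fe : List (List (String × String))) :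
    ∀ d : PySem.Dict String (List (String × String)),
      (fe.foldl pvStepA d).keys = fe.foldl (fun s e => PySem.Set.add s (pvIdent e)) d.keys := by
  induction fe with
  | nil => intro d; rfl
  | cons e fe ih =>
    intro d
    simp only [List.foldl_cons, ih, stepA_keys]

theorem keys_lv (fe : List (List (String × String))) :
    (fe.foldl pvStepA PySem.Dict.empty).keys = PySem.Set.ofList (fe.map pvIdent) := by
  rw [keys_foldl_stepA, PySem.Set.ofList_eq_foldl, List.foldl_map]
  rfl

-- a winner produced by Source B's inner scan carries the identifier it was scanned for
theorem pvIdent_of_foldl_stepB (fe : List (List (String × String))) (k : String) :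
    ∀ b : Option (List (String × String)),
      (∀ e, b = some e → pvIdent e = k) →
      ∀ e, fe.foldl (pvStepB k) b = some e → pvIdent e = k := by
  induction fe with
  | nil => intro b hb e he; exact hb e he
  | cons x fe ih =>
    intro b hb e he
    refine ih _ ?_ e he
    intro e' he'
    simp only [pvStepB] at he'
    split_ifs at he' with h
    · cases he'
      simp at h
      exact h.1
    · exact hb e' he'

-- the B-step never loses a winner, and installs one when the identifier matches
theorem isSome_stepB (k : String) (b : Option (List (String × String)))
    (e : List (String × String)) (hb : b.isSome = true) :
    (pvStepB k b e).isSome = true := by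
  cases b with
  | none => simp at hb
  | some w => simp only [pvStepB]; split_ifs <;> simp

theorem isSome_stepB_self (k : String) (b : Option (List (String × String)))
    (e : List (String × String)) (he : pvIdent e = k) :
    (pvStepB k b e).isSome = true := by
  cases b with
  | none => simp [pvStepB, he]
  | some w => simp only [pvStepB]; split_ifs <;> simp

-- the inner scan finds a winner whenever the identifier occurs in the list
theorem isSome_foldl_stepB (fe : List (List (String × String))) (k : String) :
    ∀ b : Option (List (String × String)),
      (b.isSome = true ∨ k ∈ fe.map pvIdent) →
      (fe.foldl (pvStepB k) b).isSome = true := by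
  induction fe with
  | nil =>
    intro b hb
    rcases hb with h | h
    · exact h
    · simp at h
  | cons x fe ih =>
    intro b hb
    simp only [List.foldl_cons]
    rcases hb with h | h
    · exact ih _ (Or.inl (isSome_stepB k b x h))
    · rcases List.mem_map.mp h with ⟨a, ha, hk⟩
      rcases List.mem_cons.mp ha with h1 | h1
      · exact ih _ (Or.inl (isSome_stepB_self k b x (h1 ▸ hk)))
      · exact ih _ (Or.inr (List.mem_map.mpr ⟨a, h1, hk⟩))

-- the heart of the proof: A's latest-per-identifier phase equals B's
theorem latest_phase_eq (fe : List (List (String × String))) :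
    PySem.List.sorted (fe.foldl pvStepA PySem.Dict.empty).values (fun e => pvIdent e) false =
      (PySem.List.sorted (PySem.Set.ofList (fe.map pvIdent)) (fun x => x) false).map
        (fun ident => (pvBest fe ident).getD []) := by
  set lv := fe.foldl pvStepA PySem.Dict.empty with hlv
  have hget : ∀ k, lv.get? k = pvBest fe k := fun k => by
    rw [hlv, get?_foldl_stepA]; rfl
  have hkeys : lv.keys = PySem.Set.ofList (fe.map pvIdent) := keys_lv fe
  have hnd : lv.keys.Nodup := by rw [hkeys]; exact PySem.Set.nodup_ofList _
  set ids := PySem.List.sorted (PySem.Set.ofList (fe.map pvIdent)) (fun x => x) false with hids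
  have hperm : (ids.map (fun ident => (pvBest fe ident).getD [])).Perm lv.values := by
    rw [PySem.Dict.values_eq_map_keys lv hnd [], hkeys]
    refine ((PySem.List.sorted_perm _ _ _).map _).trans (List.Perm.of_eq ?_)
    refine List.map_congr_left fun k _ => ?_
    rw [PySem.Dict.getD_eq_get?_getD, hget]
  have hids_mem : ∀ k ∈ ids, pvIdent ((pvBest fe k).getD []) = k := by
    intro k hk
    have hk' : k ∈ fe.map pvIdent := by
      rw [hids, PySem.List.mem_sorted] at hk
      exact (PySem.Set.mem_ofList _ _).mp hk
    have hs : (pvBest fe k).isSome = true := isSome_foldl_stepB fe k none (Or.inr hk')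
    rcases hbs : pvBest fe k with _ | e
    · rw [hbs] at hs; simp at hs
    · have he : pvIdent e = k :=
        pvIdent_of_foldl_stepB fe k none (by simp) e (by rw [← hbs]; rfl)
      simpa using he
  have hpw : (ids.map (fun ident => (pvBest fe ident).getD [])).Pairwise
      (fun a b => pvIdent a < pvIdent b) := by
    rw [List.pairwise_map]
    have hlt := PySem.List.sorted_ofList_pairwise_lt (fe.map pvIdent)
    rw [← hids] at hlt
    exact List.Pairwise.imp_of_mem
      (fun {a b} ha hb hab => by rw [hids_mem a ha, hids_mem b hb]; exact hab) hlt
  exact PySem.List.sorted_eq_of_perm_of_pairwise_lt _ _ _ hperm hpw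

-- ===== VERDICT (by name: the statement is the Claim_ definition above) =====
theorem filter_simple_spec : Claim_equal_filter_simple := by
  intro entries where_eq latest _ _
  unfold Spec_filter_simple filter_simple filter_simple_alt
  cases latest with
  | false => rfl
  | true =>
    simp only [Bool.not_true, Bool.false_eq_true, if_false]
    exact latest_phase_eq (pvFilter entries where_eq)
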